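-- pv_equiv track=rewrite | github.com/pratikkadam22/coding-practice | tests/optimalcapacity.py | optimalUtilization
-- ===== SOURCE A (Python) =====
-- def optimalUtilization(deviceCapacity, foregroundAppList, backgroundAppList):
--     if deviceCapacity == 0 or len(foregroundAppList) == 0 or len(backgroundAppList) == 0:
--         return []
--     foregroundAppList.sort(key = lambda x: x[1])
--     backgroundAppList.sort(key = lambda x: x[1])
--
--     i = 0
--     j = len(backgroundAppList) - 1
--     maxutil = 0
--     while(i < len(foregroundAppList) and j >= 0):
--         a = foregroundAppList[i][1]
--         b = backgroundAppList[j][1]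
--         if (a + b) <= deviceCapacity:
--             maxutil = max(a+b, maxutil)
--             i += 1
--         else:
--             j -= 1
--     result = []
--     temp = {}
--
--     for f in foregroundAppList:
--         if f[1] not in temp:
--             temp[f[1]] = []
--         temp[f[1]].append(f[0])
--
--     for b in backgroundAppList:
--         if maxutil - b[1] in temp:
--             for x in temp[maxutil - b[1]]:
--                 result.append([x, b[0]])
--
--     return result
-- ===== SOURCE B (Python) =====
-- def optimalUtilization(deviceCapacity, foregroundAppList, backgroundAppList):
--     # NOTE: like A, sorts both argument lists in place (same observable mutation).
--     if deviceCapacity == 0 or len(foregroundAppList) == 0 or len(backgroundAppList) == 0: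
--         return []
--     foregroundAppList.sort(key=lambda x: x[1])
--     backgroundAppList.sort(key=lambda x: x[1])
--     maxutil = 0
--     for f in foregroundAppList:
--         for b in backgroundAppList:
--             s = f[1] + b[1]
--             if s <= deviceCapacity and s > maxutil:
--                 maxutil = s
--     return [[f[0], b[0]]
--             for b in backgroundAppList
--             for f in foregroundAppList
--             if f[1] + b[1] == maxutil]
-- ===== Notes on version B (the rewrite author's own statement) =====
-- stated objective: simpler
-- what changed: Replaces the two-pointer scan with a plain nested-loop maximum and replaces the dict-of-name-lists tail with a single list comprehension filtering f[1]+b[1]==maxutil over the two sorted lists.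
import Mathlib
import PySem

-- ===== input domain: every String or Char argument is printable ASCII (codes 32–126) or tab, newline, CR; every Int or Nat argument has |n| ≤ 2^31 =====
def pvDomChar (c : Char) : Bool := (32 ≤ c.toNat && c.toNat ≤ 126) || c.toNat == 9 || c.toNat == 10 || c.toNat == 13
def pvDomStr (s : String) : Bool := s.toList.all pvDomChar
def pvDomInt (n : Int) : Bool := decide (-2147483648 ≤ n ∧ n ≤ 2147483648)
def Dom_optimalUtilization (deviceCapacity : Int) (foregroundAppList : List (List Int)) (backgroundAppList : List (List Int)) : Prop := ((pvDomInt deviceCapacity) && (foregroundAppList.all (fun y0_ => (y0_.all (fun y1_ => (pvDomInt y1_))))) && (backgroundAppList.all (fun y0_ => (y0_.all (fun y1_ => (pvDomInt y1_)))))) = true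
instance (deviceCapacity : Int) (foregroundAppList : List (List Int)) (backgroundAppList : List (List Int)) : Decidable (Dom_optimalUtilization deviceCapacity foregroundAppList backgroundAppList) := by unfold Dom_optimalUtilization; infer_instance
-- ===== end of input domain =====

-- B replaces A's two-pointer maximum scan and dict-of-name-lists pairing with a nested-loop
-- maximum and one filtering comprehension (objective: simpler; not faster). Both A and B sort the
-- two argument lists in place; the equivalence proved here is about the return value.

-- ===== PORT A =====
-- the while-loop of A; jp stands for j+1 so that j = -1 (loop exit) is jp = 0
def pvLoopA (cap : Int) (F B : List (List Int)) (i jp : Nat) (m : Int) : Int :=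
  if h : i < F.length ∧ 0 < jp then
    let a := PySem.List.pyGetD (F.getD i []) 1 0
    let b := PySem.List.pyGetD (B.getD (jp - 1) []) 1 0
    if a + b ≤ cap then pvLoopA cap F B (i + 1) jp (max (a + b) m)
    else pvLoopA cap F B i (jp - 1) m
  else m
termination_by (F.length - i) + jp
decreasing_by · omega
              · omega

def optimalUtilization (deviceCapacity : Int) (foregroundAppList : List (List Int)) (backgroundAppList : List (List Int)) : List (List Int) :=
  if deviceCapacity = 0 ∨ foregroundAppList.length = 0 ∨ backgroundAppList.length = 0 then []
  else
    let F := PySem.List.sorted foregroundAppList (fun x => PySem.List.pyGetD x 1 0) false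
    let B := PySem.List.sorted backgroundAppList (fun x => PySem.List.pyGetD x 1 0) false
    let maxutil := pvLoopA deviceCapacity F B 0 B.length 0
    let temp : PySem.Dict Int (List Int) :=
      F.foldl (fun d f => d.modify (PySem.List.pyGetD f 1 0) [] (· ++ [PySem.List.pyGetD f 0 0])) PySem.Dict.empty
    B.foldl (fun acc b =>
      if temp.contains (maxutil - PySem.List.pyGetD b 1 0) then
        (temp.getD (maxutil - PySem.List.pyGetD b 1 0) []).foldl
          (fun acc2 x => acc2 ++ [[x, PySem.List.pyGetD b 0 0]]) acc
      else acc) []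

-- ===== PORT B =====
-- the nested-loop maximum of Source B
def pvBrute (cap : Int) (F B : List (List Int)) : Int :=
  F.foldl (fun m f =>
    B.foldl (fun m b =>
      let s := PySem.List.pyGetD f 1 0 + PySem.List.pyGetD b 1 0
      if s ≤ cap ∧ m < s then s else m) m) 0

def optimalUtilization_alt (deviceCapacity : Int) (foregroundAppList : List (List Int)) (backgroundAppList : List (List Int)) : List (List Int) :=
  if deviceCapacity = 0 ∨ foregroundAppList.length = 0 ∨ backgroundAppList.length = 0 then []
  else
    let F := PySem.List.sorted foregroundAppList (fun x => PySem.List.pyGetD x 1 0) false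
    let B := PySem.List.sorted backgroundAppList (fun x => PySem.List.pyGetD x 1 0) false
    let maxutil := pvBrute deviceCapacity F B
    B.flatMap (fun b =>
      (F.filter (fun f => PySem.List.pyGetD f 1 0 + PySem.List.pyGetD b 1 0 == maxutil)).map
        (fun f => [PySem.List.pyGetD f 0 0, PySem.List.pyGetD b 0 0]))

-- ===== PRECONDITION & SPEC =====
-- Pre_ excludes exactly the inputs where Python A raises IndexError: once the early-return guard
-- fails, every element of both lists is indexed at [0] and [1], so all rows need length ≥ 2.
def Pre_optimalUtilization (deviceCapacity : Int) (foregroundAppList : List (List Int)) (backgroundAppList : List (List Int)) : Prop :=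
  deviceCapacity = 0 ∨ foregroundAppList = [] ∨ backgroundAppList = [] ∨
    ((∀ x ∈ foregroundAppList, 2 ≤ x.length) ∧ (∀ x ∈ backgroundAppList, 2 ≤ x.length))
instance (deviceCapacity : Int) (foregroundAppList : List (List Int)) (backgroundAppList : List (List Int)) : Decidable (Pre_optimalUtilization deviceCapacity foregroundAppList backgroundAppList) := by unfold Pre_optimalUtilization; infer_instance
def pvWitness_optimalUtilization : Int × List (List Int) × List (List Int) := (7, [[1, 3], [2, 4]], [[5, 2], [6, 3]])

def Spec_optimalUtilization (deviceCapacity : Int) (foregroundAppList : List (List Int)) (backgroundAppList : List (List Int)) (out : List (List Int)) : Prop := out = optimalUtilization_alt deviceCapacity foregroundAppList backgroundAppList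
instance (deviceCapacity : Int) (foregroundAppList : List (List Int)) (backgroundAppList : List (List Int)) (out : List (List Int)) : Decidable (Spec_optimalUtilization deviceCapacity foregroundAppList backgroundAppList out) := by unfold Spec_optimalUtilization; infer_instance

-- ===== CLAIM (what is proved, stated in full; the proofs are below) =====
def Claim_equal_optimalUtilization : Prop := ∀ (deviceCapacity : Int) (foregroundAppList : List (List Int)) (backgroundAppList : List (List Int)), Dom_optimalUtilization deviceCapacity foregroundAppList backgroundAppList → Pre_optimalUtilization deviceCapacity foregroundAppList backgroundAppList → Spec_optimalUtilization deviceCapacity foregroundAppList backgroundAppList (optimalUtilization deviceCapacity foregroundAppList backgroundAppList)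

-- ===== LEMMAS AND PROOFS =====

def pvKey (x : List Int) : Int := PySem.List.pyGetD x 1 0

def pvMSpec (cap : Int) (F B : List (List Int)) (m : Int) : Prop :=
  0 ≤ m ∧
  (∀ f ∈ F, ∀ b ∈ B, pvKey f + pvKey b ≤ cap → pvKey f + pvKey b ≤ m) ∧
  (m = 0 ∨ ∃ f ∈ F, ∃ b ∈ B, pvKey f + pvKey b ≤ cap ∧ m = pvKey f + pvKey b)

theorem pvMSpec_unique {cap : Int} {F B : List (List Int)} {m₁ m₂ : Int}
    (h₁ : pvMSpec cap F B m₁) (h₂ : pvMSpec cap F B m₂) : m₁ = m₂ := by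
  obtain ⟨z₁, d₁, w₁⟩ := h₁
  obtain ⟨z₂, d₂, w₂⟩ := h₂
  have le₁ : m₁ ≤ m₂ := by
    rcases w₁ with h | ⟨f, hf, b, hb, hv, he⟩
    · omega
    · exact he ▸ d₂ f hf b hb hv
  have le₂ : m₂ ≤ m₁ := by
    rcases w₂ with h | ⟨f, hf, b, hb, hv, he⟩
    · omega
    · exact he ▸ d₁ f hf b hb hv
  omega

theorem pvBrute_inner (cap : Int) (f : List Int) (B : List (List Int)) (m0 : Int) :
    let r := B.foldl (fun m b =>
      if PySem.List.pyGetD f 1 0 + PySem.List.pyGetD b 1 0 ≤ cap ∧ m < PySem.List.pyGetD f 1 0 + PySem.List.pyGetD b 1 0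
      then PySem.List.pyGetD f 1 0 + PySem.List.pyGetD b 1 0 else m) m0
    m0 ≤ r ∧ (∀ b ∈ B, pvKey f + pvKey b ≤ cap → pvKey f + pvKey b ≤ r) ∧
      (r = m0 ∨ ∃ b ∈ B, pvKey f + pvKey b ≤ cap ∧ r = pvKey f + pvKey b) := by
  induction B generalizing m0 with
  | nil => simp
  | cons b B ih =>
    simp only [List.foldl_cons]
    set m1 := (if PySem.List.pyGetD f 1 0 + PySem.List.pyGetD b 1 0 ≤ cap ∧ m0 < PySem.List.pyGetD f 1 0 + PySem.List.pyGetD b 1 0 then PySem.List.pyGetD f 1 0 + PySem.List.pyGetD b 1 0 else m0) with hm1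
    obtain ⟨h1, h2, h3⟩ := ih m1
    have hm0 : m0 ≤ m1 := by rw [hm1]; split <;> omega
    have hb : pvKey f + pvKey b ≤ cap → pvKey f + pvKey b ≤ m1 := by
      intro hv; rw [hm1]; simp only [pvKey] at *; split <;> omega
    refine ⟨le_trans hm0 h1, ?_, ?_⟩
    · intro b' hb' hv
      rcases List.mem_cons.mp hb' with rfl | hmem
      · exact le_trans (hb hv) h1
      · exact h2 b' hmem hv
    · rcases h3 with he | ⟨b', hb', hv, he⟩
      · rw [he, hm1]
        split
        · rename_i hc; right; exact ⟨b, List.mem_cons_self, by simpa [pvKey] using hc.1, rfl⟩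
        · left; rfl
      · right; exact ⟨b', List.mem_cons_of_mem _ hb', hv, he⟩

theorem pvBrute_outer (cap : Int) (B : List (List Int)) (F : List (List Int)) (m0 : Int) :
    let r := F.foldl (fun m f =>
      B.foldl (fun m b =>
        if PySem.List.pyGetD f 1 0 + PySem.List.pyGetD b 1 0 ≤ cap ∧ m < PySem.List.pyGetD f 1 0 + PySem.List.pyGetD b 1 0
        then PySem.List.pyGetD f 1 0 + PySem.List.pyGetD b 1 0 else m) m) m0
    m0 ≤ r ∧ (∀ f ∈ F, ∀ b ∈ B, pvKey f + pvKey b ≤ cap → pvKey f + pvKey b ≤ r) ∧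
      (r = m0 ∨ ∃ f ∈ F, ∃ b ∈ B, pvKey f + pvKey b ≤ cap ∧ r = pvKey f + pvKey b) := by
  induction F generalizing m0 with
  | nil => simp
  | cons f F ih =>
    simp only [List.foldl_cons]
    obtain ⟨i1, i2, i3⟩ := pvBrute_inner cap f B m0
    set m1 := B.foldl (fun m b =>
      if PySem.List.pyGetD f 1 0 + PySem.List.pyGetD b 1 0 ≤ cap ∧ m < PySem.List.pyGetD f 1 0 + PySem.List.pyGetD b 1 0
      then PySem.List.pyGetD f 1 0 + PySem.List.pyGetD b 1 0 else m) m0 with hm1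
    obtain ⟨h1, h2, h3⟩ := ih m1
    refine ⟨le_trans i1 h1, ?_, ?_⟩
    · intro f' hf' b hb hv
      rcases List.mem_cons.mp hf' with rfl | hmem
      · exact le_trans (i2 b hb hv) h1
      · exact h2 f' hmem b hb hv
    · rcases h3 with he | ⟨f', hf', b, hb, hv, he⟩
      · rcases i3 with he' | ⟨b, hb, hv, he'⟩
        · left; omega
        · right; exact ⟨f, List.mem_cons_self, b, hb, hv, by omega⟩
      · right; exact ⟨f', List.mem_cons_of_mem _ hf', b, hb, hv, he⟩

theorem pvBrute_spec (cap : Int) (F B : List (List Int)) : pvMSpec cap F B (pvBrute cap F B) := by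
  have h := pvBrute_outer cap B F 0
  exact h

theorem pvLoopA_spec (cap : Int) (F B : List (List Int))
    (hF : ∀ p q (hpq : p ≤ q) (hq : q < F.length), pvKey (F[p]'(lt_of_le_of_lt hpq hq)) ≤ pvKey F[q])
    (hB : ∀ p q (hpq : p ≤ q) (hq : q < B.length), pvKey (B[p]'(lt_of_le_of_lt hpq hq)) ≤ pvKey B[q]) :
    ∀ n i jp m, (F.length - i) + jp ≤ n → jp ≤ B.length →
    (∀ i' (hi' : i' < F.length), ∀ j' (hj' : j' < B.length), (i' < i ∨ jp ≤ j') →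
      pvKey F[i'] + pvKey B[j'] ≤ cap → pvKey F[i'] + pvKey B[j'] ≤ m) →
    0 ≤ m →
    (m = 0 ∨ ∃ f ∈ F, ∃ b ∈ B, pvKey f + pvKey b ≤ cap ∧ m = pvKey f + pvKey b) →
    pvMSpec cap F B (pvLoopA cap F B i jp m) := by
  intro n
  induction n with
  | zero =>
    intro i jp m hn hjp hdom h0 hwit
    have hi : ¬ (i < F.length ∧ 0 < jp) := by omega
    rw [pvLoopA, dif_neg hi]
    refine ⟨h0, ?_, hwit⟩
    intro f hf b hb hv
    obtain ⟨i', hi', rfl⟩ := List.mem_iff_getElem.mp hf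
    obtain ⟨j', hj', rfl⟩ := List.mem_iff_getElem.mp hb
    exact hdom i' hi' j' hj' (by omega) hv
  | succ n ih =>
    intro i jp m hn hjp hdom h0 hwit
    by_cases hc : i < F.length ∧ 0 < jp
    · obtain ⟨hiF, hjp0⟩ := hc
      have hj1 : jp - 1 < B.length := by omega
      have hFi : F.getD i [] = F[i] := List.getD_eq_getElem F [] hiF
      have hBj : B.getD (jp - 1) [] = B[jp - 1] := List.getD_eq_getElem B [] hj1
      rw [pvLoopA, dif_pos ⟨hiF, hjp0⟩]
      have hpk : ∀ x : List Int, PySem.List.pyGetD x 1 0 = pvKey x := fun _ => rfl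
      simp only [hFi, hBj, hpk]
      by_cases hsum : pvKey F[i] + pvKey B[jp-1] ≤ cap
      · rw [if_pos hsum]
        apply ih (i + 1) jp _ (by omega) hjp
        · intro i' hi' j' hj' hcase hv
          have hle : pvKey F[i'] + pvKey B[j'] ≤ max (pvKey F[i] + pvKey B[jp-1]) m := by
            rcases hcase with hlt | hge
            · rcases Nat.lt_succ_iff_lt_or_eq.mp hlt with h' | rfl
              · exact le_trans (hdom i' hi' j' hj' (Or.inl h') hv) (le_max_right _ _)
              · by_cases hj'c : jp ≤ j'
                · exact le_trans (hdom i' hi' j' hj' (Or.inr hj'c) hv) (le_max_right _ _)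
                · have : pvKey B[j'] ≤ pvKey B[jp-1] := hB j' (jp-1) (by omega) hj1
                  have := le_max_left (pvKey F[i'] + pvKey B[jp-1]) m
                  omega
            · exact le_trans (hdom i' hi' j' hj' (Or.inr hge) hv) (le_max_right _ _)
          exact hle
        · omega
        · rcases le_or_gt (pvKey F[i] + pvKey B[jp-1]) m with hmx | hmx
          · rw [max_eq_right hmx]; exact hwit
          · rw [max_eq_left (le_of_lt hmx)]
            right
            exact ⟨F[i], List.getElem_mem hiF, B[jp-1], List.getElem_mem hj1, hsum, rfl⟩
      · rw [if_neg hsum]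
        apply ih i (jp - 1) m (by omega) (by omega) _ h0 hwit
        intro i' hi' j' hj' hcase hv
        rcases hcase with hlt | hge
        · exact hdom i' hi' j' hj' (Or.inl hlt) hv
        · by_cases hj'c : jp ≤ j'
          · exact hdom i' hi' j' hj' (Or.inr hj'c) hv
          · -- j' = jp - 1; i' ≥ i: sum > cap, contradiction
            have hj'e : j' = jp - 1 := by omega
            by_cases hii : i' < i
            · exact hdom i' hi' j' hj' (Or.inl hii) hv
            · exfalso
              have hkf : pvKey F[i] ≤ pvKey F[i'] := hF i i' (by omega) hi'
              subst hj'e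
              omega
    · rw [pvLoopA, dif_neg hc]
      refine ⟨h0, ?_, hwit⟩
      intro f hf b hb hv
      obtain ⟨i', hi', rfl⟩ := List.mem_iff_getElem.mp hf
      obtain ⟨j', hj', rfl⟩ := List.mem_iff_getElem.mp hb
      exact hdom i' hi' j' hj' (by omega) hv

theorem pvMax_eq (cap : Int) (F B : List (List Int)) :
    pvLoopA cap (PySem.List.sorted F pvKey false) (PySem.List.sorted B pvKey false) 0
        (PySem.List.sorted B pvKey false).length 0
      = pvBrute cap (PySem.List.sorted F pvKey false) (PySem.List.sorted B pvKey false) := by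
  set F' := PySem.List.sorted F pvKey false with hF'
  set B' := PySem.List.sorted B pvKey false with hB'
  have hFm : ∀ p q (hpq : p ≤ q) (hq : q < F'.length), pvKey (F'[p]'(lt_of_le_of_lt hpq hq)) ≤ pvKey F'[q] := by
    intro p q hpq hq
    exact PySem.List.key_sorted_getElem_mono F pvKey hpq hq
  have hBm : ∀ p q (hpq : p ≤ q) (hq : q < B'.length), pvKey (B'[p]'(lt_of_le_of_lt hpq hq)) ≤ pvKey B'[q] := by
    intro p q hpq hq
    exact PySem.List.key_sorted_getElem_mono B pvKey hpq hq
  have hA := pvLoopA_spec cap F' B' hFm hBm (F'.length + B'.length) 0 B'.length 0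
      (by omega) (le_refl _) (by intro i' hi' j' hj' hcase; omega) (le_refl _) (Or.inl rfl)
  exact pvMSpec_unique hA (pvBrute_spec cap F' B')

theorem pvTemp_getD (F : List (List Int)) (t : Int) :
    (F.foldl (fun d f => d.modify (PySem.List.pyGetD f 1 0) [] (· ++ [PySem.List.pyGetD f 0 0]))
        PySem.Dict.empty).getD t []
      = (F.filter (fun f => PySem.List.pyGetD f 1 0 == t)).map (fun f => PySem.List.pyGetD f 0 0) := by
  have h1 : F.foldl (fun d f => d.modify (PySem.List.pyGetD f 1 0) [] (· ++ [PySem.List.pyGetD f 0 0]))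
        (PySem.Dict.empty : PySem.Dict Int (List Int))
      = (F.map (fun f => (PySem.List.pyGetD f 1 0, PySem.List.pyGetD f 0 0))).foldl
          (fun d p => d.modify p.1 [] (· ++ [p.2])) PySem.Dict.empty := by
    rw [List.foldl_map]
  rw [h1, PySem.Dict.getD_foldl_modify_append]
  simp [List.filter_map, Function.comp_def, List.map_map]

theorem main_eq (cap : Int) (F0 B0 : List (List Int)) :
    optimalUtilization cap F0 B0 = optimalUtilization_alt cap F0 B0 := by
  unfold optimalUtilization optimalUtilization_alt
  split
  · rfl
  · have hk : (fun x : List Int => PySem.List.pyGetD x 1 0) = pvKey := rfl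
    simp only [hk]
    set F' := PySem.List.sorted F0 pvKey false with hF'
    set B' := PySem.List.sorted B0 pvKey false with hB'
    rw [pvMax_eq]
    set mx := pvBrute cap F' B' with hmx
    set temp := F'.foldl (fun d f => d.modify (pvKey f) [] (· ++ [PySem.List.pyGetD f 0 0])) PySem.Dict.empty with htemp
    have hstep : ∀ (acc : List (List Int)) (b : List Int), b ∈ B' →
        (if temp.contains (mx - pvKey b) then
          (temp.getD (mx - pvKey b) []).foldl (fun acc2 x => acc2 ++ [[x, PySem.List.pyGetD b 0 0]]) acc
        else acc)
        = acc ++ ((F'.filter (fun f => pvKey f + pvKey b == mx)).map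
            (fun f => [PySem.List.pyGetD f 0 0, PySem.List.pyGetD b 0 0])) := by
      intro acc b _
      have hg : temp.getD (mx - pvKey b) []
          = (F'.filter (fun f => pvKey f == mx - pvKey b)).map (fun f => PySem.List.pyGetD f 0 0) :=
        pvTemp_getD F' (mx - pvKey b)
      have hpred : ∀ f : List Int, (pvKey f == mx - pvKey b) = (pvKey f + pvKey b == mx) := by
        intro f
        rcases eq_or_ne (pvKey f) (mx - pvKey b) with h | h
        · simp [h]

        · have h2 : pvKey f + pvKey b ≠ mx := by omega
          simp [h, h2]
      have hmap : (temp.getD (mx - pvKey b) []).map (fun x => [x, PySem.List.pyGetD b 0 0])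
          = (F'.filter (fun f => pvKey f + pvKey b == mx)).map
              (fun f => [PySem.List.pyGetD f 0 0, PySem.List.pyGetD b 0 0]) := by
        rw [hg, List.map_map]
        rw [List.filter_congr (fun f _ => hpred f)]
        rfl
      by_cases hcont : temp.contains (mx - pvKey b)
      · rw [if_pos hcont, PySem.List.foldl_append_singleton_eq_map, hmap]
      · rw [if_neg hcont]
        have hnil : temp.getD (mx - pvKey b) [] = [] :=
          PySem.Dict.getD_of_not_contains _ _ (by simpa using hcont)
        have : ((F'.filter (fun f => pvKey f + pvKey b == mx)).map
            (fun f => [PySem.List.pyGetD f 0 0, PySem.List.pyGetD b 0 0])) = [] := by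
          rw [← hmap, hnil]; rfl
        rw [this, List.append_nil]
    calc B'.foldl (fun acc b =>
          if temp.contains (mx - pvKey b) then
            (temp.getD (mx - pvKey b) []).foldl (fun acc2 x => acc2 ++ [[x, PySem.List.pyGetD b 0 0]]) acc
          else acc) []
        = B'.foldl (fun acc b => acc ++ ((F'.filter (fun f => pvKey f + pvKey b == mx)).map
            (fun f => [PySem.List.pyGetD f 0 0, PySem.List.pyGetD b 0 0]))) [] := by
          apply PySem.List.foldl_congr_mem
          intro acc b hb
          exact hstep acc b hb
      _ = B'.flatMap (fun b => (F'.filter (fun f => pvKey f + pvKey b == mx)).map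
            (fun f => [PySem.List.pyGetD f 0 0, PySem.List.pyGetD b 0 0])) := by
          rw [PySem.List.foldl_append_eq_flatMap]; rfl

-- ===== VERDICT (by name: the statement is the Claim_ definition above) =====
theorem optimalUtilization_spec : Claim_equal_optimalUtilization := by
  intro deviceCapacity foregroundAppList backgroundAppList _ _
  unfold Spec_optimalUtilization
  exact main_eq deviceCapacity foregroundAppList backgroundAppList
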